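-- pv_equiv track=rewrite | github.com/gh-arnab21/BDH_interpretability | scripts/precompute_monosemanticity.py | _split_sentence_to_words
-- ===== SOURCE A (Python) =====
-- from typing import Dict, List, Any, Tuple, Optional
--
-- def _split_sentence_to_words(sentence: str) -> List[Tuple[str, int, int]]:
--     """
--     Split a sentence into words with their byte-range positions.
--     Returns: [(word, byte_start, byte_end), ...]
--     """
--     words: List[Tuple[str, int, int]] = []
--     byte_pos = 0
--     for word in sentence.split(" "):
--         word_bytes = len(word.encode("utf-8"))
--         words.append((word, byte_pos, byte_pos + word_bytes))
--         byte_pos += word_bytes + 1  # +1 for the space byte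
--     return words
-- ===== SOURCE B (Python) =====
-- from typing import List, Tuple
--
--
-- def _split_sentence_to_words(sentence: str) -> List[Tuple[str, int, int]]:
--     # Scan the raw UTF-8 byte string for separator bytes with find(): each word's
--     # byte range is read off directly from the separator positions, with no
--     # per-word length accounting or running offset accumulation.
--     data = sentence.encode("utf-8")
--     out: List[Tuple[str, int, int]] = []
--     start = 0
--     i = data.find(b" ")
--     while i >= 0:
--         out.append((data[start:i].decode("utf-8"), start, i))
--         start = i + 1
--         i = data.find(b" ", start)
--     out.append((data[start:].decode("utf-8"), start, len(data)))
--     return out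
-- ===== Notes on version B (the rewrite author's own statement) =====
-- stated objective: alternative
-- what changed: B scans the raw UTF-8 byte string for separator bytes with find() and reads each word's byte range directly off the separator positions, instead of A's split()-then-running-offset accumulation over per-word encoded lengths.
import Mathlib
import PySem

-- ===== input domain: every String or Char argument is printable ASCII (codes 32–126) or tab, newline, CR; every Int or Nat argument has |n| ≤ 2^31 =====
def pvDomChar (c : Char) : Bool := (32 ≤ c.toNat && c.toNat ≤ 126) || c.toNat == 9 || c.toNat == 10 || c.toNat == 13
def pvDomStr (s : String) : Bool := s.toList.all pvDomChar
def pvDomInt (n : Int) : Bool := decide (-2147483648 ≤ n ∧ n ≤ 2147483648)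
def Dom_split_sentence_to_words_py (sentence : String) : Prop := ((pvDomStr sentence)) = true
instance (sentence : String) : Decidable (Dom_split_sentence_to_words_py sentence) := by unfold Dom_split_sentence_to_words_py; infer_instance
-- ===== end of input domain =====

-- B scans the raw byte string for the separator with find() and reads each word's byte
-- range directly off the separator positions, instead of A's split()-then-accumulate loop;
-- alternative decomposition, same O(n) cost.

-- ===== PORT A =====
-- A's running-offset loop over sentence.split(" "); len(word.encode("utf-8")) is ported as
-- PySem.Str.len word (code points = bytes on the ASCII domain, where the claim lives).
def split_sentence_to_words_py (sentence : String) : List (String × Int × Int) :=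
  (((PySem.Str.split? sentence " ").getD []).foldl
    (fun (st : List (String × Int × Int) × Int) word =>
      (st.1 ++ [(word, st.2, st.2 + PySem.Str.len word)], st.2 + PySem.Str.len word + 1))
    ([], 0)).1

-- ===== PORT B =====
-- termination helper for the find() loop: a found position lies in [start, data.length)
theorem pvFindBounds (data : List Char) (start : Nat)
    (h : 0 ≤ PySem.Chars.findFrom data [' '] (start : Int)) :
    start ≤ (PySem.Chars.findFrom data [' '] (start : Int)).toNat ∧
      (PySem.Chars.findFrom data [' '] (start : Int)).toNat < data.length := by
  by_cases hs : start ≤ data.length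
  · have hne : PySem.Chars.findFrom data [' '] (start : Int) ≠ -1 := by omega
    obtain ⟨h1, h2, -⟩ := PySem.Chars.findFrom_natCast_spec data [' '] start hs hne
    refine ⟨by omega, ?_⟩
    by_contra hge
    push_neg at hge
    rw [List.drop_eq_nil_of_le hge] at h2
    simp at h2
  · exfalso
    have : PySem.Chars.findFrom data [' '] (start : Int) = -1 := by
      simp only [PySem.Chars.findFrom]
      split <;> split <;> omega
    omega

-- B's while loop: i = data.find(b" ", start); emit (data[start:i], start, i) while found,
-- then the tail (data[start:], start, len(data)). Chars stand for UTF-8 bytes, exact on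
-- the ASCII domain the claim quantifies over.
def pvAltLoop (data : List Char) (start : Nat) (out : List (String × Int × Int)) :
    List (String × Int × Int) :=
  let i := PySem.Chars.findFrom data [' '] (start : Int)
  if h : 0 ≤ i then
    pvAltLoop data (i.toNat + 1)
      (out ++ [(String.ofList (PySem.List.slice data (some (start : Int)) (some i)),
                (start : Int), i)])
  else
    out ++ [(String.ofList (PySem.List.slice data (some (start : Int)) none),
             (start : Int), (data.length : Int))]
termination_by data.length + 1 - start
decreasing_by
  have := pvFindBounds data start h
  omega

def split_sentence_to_words_py_alt (sentence : String) : List (String × Int × Int) :=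
  pvAltLoop sentence.toList 0 []

-- ===== PRECONDITION & SPEC =====
def Spec_split_sentence_to_words_py (sentence : String) (out : List (String × Int × Int)) : Prop := out = split_sentence_to_words_py_alt sentence
instance (sentence : String) (out : List (String × Int × Int)) : Decidable (Spec_split_sentence_to_words_py sentence out) := by unfold Spec_split_sentence_to_words_py; infer_instance

-- ===== CLAIM (what is proved, stated in full; the proofs are below) =====
def Claim_equal_split_sentence_to_words_py : Prop := ∀ (sentence : String), Dom_split_sentence_to_words_py sentence → Spec_split_sentence_to_words_py sentence (split_sentence_to_words_py sentence)

-- ===== LEMMAS AND PROOFS =====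

-- reference split on ' ' (proved equal to PySem.Chars.splitOn · [' '] below)
def sp : List Char → List (List Char)
  | [] => [[]]
  | c :: cs => if c = ' ' then [] :: sp cs else (sp cs).modifyHead (c :: ·)

theorem sp_ne_nil (l : List Char) : sp l ≠ [] := by
  cases l with
  | nil => simp [sp]
  | cons c cs => simp [sp]; split <;> simp [List.modifyHead_eq_nil_iff, sp_ne_nil cs]

theorem go_sp (fuel : Nat) (l cur : List Char) (acc : List (List Char))
    (h : l.length < fuel) :
    PySem.Chars.splitOn.go [' '] fuel l cur acc =
      acc.reverse ++ (sp l).modifyHead (cur.reverse ++ ·) := by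
  induction fuel generalizing l cur acc with
  | zero => omega
  | succ fuel ih =>
    cases l with
    | nil => simp [PySem.Chars.splitOn.go, sp]
    | cons c cs =>
      rw [PySem.Chars.splitOn.go]
      by_cases hc : c = ' '
      · subst hc
        have hpre : [' '].isPrefixOf (' ' :: cs) = true := by simp
        rw [if_pos hpre]
        show PySem.Chars.splitOn.go [' '] fuel cs [] (cur.reverse :: acc) = _
        rw [ih cs [] _ (by simpa using Nat.lt_of_succ_lt_succ (by simpa using h))]
        simp [sp]
        exact congrFun List.modifyHead_id _
      · have : [' '].isPrefixOf (c :: cs) = false := by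
          simp [List.isPrefixOf]
          exact fun hq => absurd hq.symm hc
        simp only [this, Bool.false_eq_true, if_false]
        rw [ih cs (c :: cur) acc (by simpa using Nat.lt_of_succ_lt_succ (by simpa using h))]
        have hne := sp_ne_nil cs
        cases hsp : sp cs with
        | nil => exact absurd hsp hne
        | cons w ws => simp [sp, hc, hsp, List.modifyHead]

theorem splitOn_sp (l : List Char) : PySem.Chars.splitOn l [' '] = sp l := by
  rw [PySem.Chars.splitOn, go_sp _ _ _ _ (by omega)]
  simp only [List.reverse_nil, List.nil_append]
  exact congrFun List.modifyHead_id _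

theorem sp_nospace (l : List Char) (h : ' ' ∉ l) : sp l = [l] := by
  induction l with
  | nil => simp [sp]
  | cons c cs ih =>
    simp only [List.mem_cons, not_or] at h
    have hc : ¬ c = ' ' := fun hq => h.1 hq.symm
    simp [sp, hc, ih h.2, List.modifyHead]

theorem sp_split (w rest : List Char) (h : ' ' ∉ w) :
    sp (w ++ ' ' :: rest) = w :: sp rest := by
  induction w with
  | nil => simp [sp]
  | cons c cs ih =>
    simp only [List.mem_cons, not_or] at h
    have hc : ¬ c = ' ' := fun hq => h.1 hq.symm
    simp [sp, hc, ih h.2, List.modifyHead]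

theorem singleton_infix_iff (l : List Char) : [' '] <:+: l ↔ ' ' ∈ l := by
  constructor
  · intro h; exact h.subset (by simp)
  · intro h
    obtain ⟨s, t, rfl⟩ := List.append_of_mem h
    exact ⟨s, t, by simp⟩

-- the word/offset stream both ports compute
def pvTriples : List String → Int → List (String × Int × Int)
  | [], _ => []
  | w :: ws, pos => (w, pos, pos + PySem.Str.len w) :: pvTriples ws (pos + PySem.Str.len w + 1)

theorem pvA_foldl (ws : List String) (acc : List (String × Int × Int)) (pos : Int) :
    (ws.foldl
      (fun (st : List (String × Int × Int) × Int) word =>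
        (st.1 ++ [(word, st.2, st.2 + PySem.Str.len word)], st.2 + PySem.Str.len word + 1))
      (acc, pos)).1 = acc ++ pvTriples ws pos := by
  induction ws generalizing acc pos with
  | nil => simp [pvTriples]
  | cons w ws ih =>
    simp only [List.foldl_cons]
    rw [ih]
    simp [pvTriples]

theorem pvAltLoop_eq (data : List Char) (start : Nat) (out : List (String × Int × Int))
    (hs : start ≤ data.length) :
    pvAltLoop data start out =
      out ++ pvTriples ((sp (data.drop start)).map String.ofList) start := by
  rw [pvAltLoop]
  by_cases h : 0 ≤ PySem.Chars.findFrom data [' '] (start : Int)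
  · set i := PySem.Chars.findFrom data [' '] (start : Int) with hi
    rw [dif_pos h]
    have hb := pvFindBounds data start h
    have hne : i ≠ -1 := by omega
    obtain ⟨h1, h2, h3⟩ := PySem.Chars.findFrom_natCast_spec data [' '] start hs hne
    rw [← hi] at h1 h2 h3
    set j := i.toNat with hj
    have hij : i = (j : Int) := by omega
    -- data.drop j = ' ' :: data.drop (j+1)
    obtain ⟨t, ht⟩ := h2
    have hdropj : data.drop j = ' ' :: data.drop (j + 1) := by
      have htail : (data.drop j).tail = data.drop (j + 1) := by
        rw [List.tail_drop]
      rw [← ht] at htail ⊢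
      simp at htail
      simp [htail]
    set w := (data.drop start).take (j - start) with hw
    have hwlen : w.length = j - start := by
      simp [hw, List.length_take, List.length_drop]
      omega
    have hsplit : data.drop start = w ++ ' ' :: data.drop (j + 1) := by
      conv_lhs => rw [← List.take_append_drop (j - start) (data.drop start)]
      rw [List.drop_drop]
      have : start + (j - start) = j := by omega
      rw [this, hdropj]
    have hnosp : ' ' ∉ w := by
      intro hmem
      obtain ⟨m, hm, hme⟩ := List.getElem_of_mem hmem
      have hmj : start + m < j := by omega
      have : data.drop (start + m) = ' ' :: data.drop (start + m + 1) := by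
        rw [List.drop_eq_getElem_cons (by omega)]
        congr 1
        have : data[start + m] = w[m] := by
          simp [hw, List.getElem_take, List.getElem_drop]
        rw [this, hme]
      exact h3 (start + m) (by omega) (by omega) ⟨data.drop (start + m + 1), by rw [this]; rfl⟩
    have hslice : PySem.List.slice data (some (start : Int)) (some i) = w := by
      rw [hij, PySem.List.slice_natCast]
    rw [pvAltLoop_eq data (j + 1) _ (by omega)]
    rw [hsplit, sp_split _ _ hnosp, hslice]
    simp only [List.map_cons, pvTriples, List.append_assoc, List.singleton_append]
    have hlw : PySem.Str.len (String.ofList w) = ((j : Int) - (start : Int)) := by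
      have hl : PySem.Str.len (String.ofList w) = (w.length : Int) := by simp
      rw [hl, hwlen]
      omega
    rw [hlw]
    have e1 : (start : Int) + ((j : Int) - (start : Int)) = i := by omega
    have e3 : ((j + 1 : Nat) : Int) = i + 1 := by omega
    rw [e1, e3]
  · -- no space from start on: emit the tail word
    have hfind : PySem.Chars.find (data.drop start) [' '] = -1 := by
      have := PySem.Chars.findFrom_natCast data [' '] start hs
      by_contra hne
      have hnn := PySem.Chars.neg_one_le_find (data.drop start) [' ']
      rw [this, if_neg hne] at h
      omega
    have hnosp : ' ' ∉ data.drop start := by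
      rw [PySem.Chars.find_eq_neg_one_iff] at hfind
      intro hmem
      exact hfind ((singleton_infix_iff _).mpr hmem)
    rw [dif_neg h, sp_nospace _ hnosp]
    simp only [List.map_cons, List.map_nil, pvTriples]
    rw [PySem.List.slice_from_natCast]
    have : PySem.Str.len (String.ofList (data.drop start)) = ((data.length : Int) - (start : Int)) := by
      have hl : PySem.Str.len (String.ofList (data.drop start)) = ((data.drop start).length : Int) := by simp
      rw [hl, List.length_drop]
      omega
    rw [this]
    have e4 : (start : Int) + ((data.length : Int) - (start : Int)) = (data.length : Int) := by omega
    rw [e4]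
termination_by data.length + 1 - start
decreasing_by
  have := pvFindBounds data start h
  omega

-- ===== VERDICT (by name: the statement is the Claim_ definition above) =====
theorem split_sentence_to_words_py_spec : Claim_equal_split_sentence_to_words_py := by
  intro sentence _
  unfold Spec_split_sentence_to_words_py split_sentence_to_words_py split_sentence_to_words_py_alt
  have hwords : (PySem.Str.split? sentence " ").getD [] =
      (sp sentence.toList).map String.ofList := by
    simp [PySem.Str.split?, PySem.Chars.split?, splitOn_sp]
  rw [hwords, pvA_foldl, pvAltLoop_eq sentence.toList 0 [] (by omega)]
  simp
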